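-- pv_equiv track=rewrite | github.com/pypi-data/pypi-mirror-400 | packages/aiel-cli/aiel_cli-1.0.1.tar.gz/aiel_cli-1.0.1/src/aiel/utilities.py | format_file_tree
-- ===== SOURCE A (Python) =====
-- from typing import Any, Dict, Tuple
--
-- def format_file_tree(manifest: Dict[str, Any]) -> str:
--     # Build a nested dict tree: {"agents": {"hello.py": None, ...}, "LICENSE": None, ...}
--     skip = {".DS_Store"}
--     root: Dict[str, Any] = {}
--
--     for path in sorted(k for k in manifest.keys() if k.split("/")[-1] not in skip):
--         parts = [p for p in path.split("/") if p]
--         node = root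
--         for i, part in enumerate(parts):
--             is_last = i == len(parts) - 1
--             if is_last:
--                 node.setdefault(part, None)
--             else:
--                 node = node.setdefault(part, {})
--
--     def render(node: Dict[str, Any], prefix: str = "") -> list[str]:
--         lines: list[str] = []
--         items = list(node.items())
--         for idx, (name, child) in enumerate(items):
--             last = idx == len(items) - 1
--             branch = "└── " if last else "├── "
--             lines.append(prefix + branch + name)
--             if isinstance(child, dict):
--                 ext = "    " if last else "│   "
--                 lines.extend(render(child, prefix + ext))
--         return lines
--
--     return "\n".join(render(root))
-- ===== SOURCE B (Python) =====
-- from typing import Any, Dict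
--
-- def format_file_tree(manifest: Dict[str, Any]) -> str:
--     # Different algorithm: no nested-dict tree is built; the sorted path list is
--     # grouped recursively by first path component (first-occurrence order), and
--     # each group is rendered directly.
--     skip = {".DS_Store"}
--     keys = sorted(k for k in manifest.keys() if k.split("/")[-1] not in skip)
--     paths = [[p for p in k.split("/") if p] for k in keys]
--
--     def walk(paths, prefix):
--         names = []
--         for ps in paths:
--             if ps and ps[0] not in names:
--                 names.append(ps[0])
--         out = []
--         while names:
--             name, names = names[0], names[1:]
--             connector, ext = ("└── ", "    ") if not names else ("├── ", "│   ")
--             out.append(prefix + connector + name)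
--             tails = [ps[1:] for ps in paths if len(ps) > 1 and ps[0] == name]
--             if tails:
--                 out.extend(walk(tails, prefix + ext))
--         return out
--
--     return "\n".join(walk(paths, ""))
-- ===== Notes on version B (the rewrite author's own statement) =====
-- stated objective: alternative
-- what changed: B builds no nested-dict tree at all: it groups the sorted slash-split path lists recursively by first component (first-occurrence order) and renders each group directly, instead of A's build-a-tree-then-recursively-render two-phase design.
-- outside the precondition, e.g. on format_file_tree({'/a/b': 1, 'a': 2}): A returns '└── a\n    └── b', B returns '└── a\n    └── b'
import Mathlib
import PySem

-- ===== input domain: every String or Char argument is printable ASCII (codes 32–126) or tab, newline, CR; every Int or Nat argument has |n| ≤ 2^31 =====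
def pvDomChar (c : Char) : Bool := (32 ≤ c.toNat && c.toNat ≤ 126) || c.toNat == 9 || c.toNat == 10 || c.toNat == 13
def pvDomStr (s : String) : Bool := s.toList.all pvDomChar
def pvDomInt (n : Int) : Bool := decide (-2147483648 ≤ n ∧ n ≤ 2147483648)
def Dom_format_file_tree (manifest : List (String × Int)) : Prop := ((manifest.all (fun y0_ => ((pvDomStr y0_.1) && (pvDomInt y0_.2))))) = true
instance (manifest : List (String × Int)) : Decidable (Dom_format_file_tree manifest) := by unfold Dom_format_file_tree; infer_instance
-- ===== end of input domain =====

-- B builds no tree at all: it groups the sorted path lists recursively by first component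
-- and renders each group directly; objective: alternative decomposition, not faster.

-- ===== PORT A =====

-- parts = [p for p in path.split("/") if p]   ("/" ≠ "", so split? is always some)
def pvParts (path : String) : List String :=
  ((PySem.Str.split? path "/").getD []).filter (fun p => p ≠ "")

-- k.split("/")[-1] not in {".DS_Store"}
def pvKeep (k : String) : Bool :=
  PySem.List.pyGet? ((PySem.Str.split? k "/").getD []) (-1) ≠ some ".DS_Store"

-- sorted(k for k in manifest.keys() if k.split("/")[-1] not in skip)
def pvSortedKeys (manifest : List (String × Int)) : List String :=
  PySem.List.sorted (((PySem.Dict.keys (PySem.Dict.ofList manifest)).filter pvKeep)) (fun x => x) false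

-- Nested Python dict {name: None | dict} as a mutual inductive (no nested inductives).
mutual
inductive PNode : Type where
  | file : PNode
  | dir : PForest → PNode
  deriving DecidableEq, Repr
inductive PForest : Type where
  | nil : PForest
  | cons : String → PNode → PForest → PForest
  deriving DecidableEq, Repr
end

mutual
-- the inner `for i, part in enumerate(parts)` walk with node.setdefault, as a
-- functional insert; where Python would hit node=None and raise AttributeError
-- (file node reused as directory) the forest is left unchanged — those inputs
-- are excluded by Pre_format_file_tree.
def pvInsert : List String → PForest → PForest
  | [], f => f
  | p :: rest, f => pvInsertGo p rest f
termination_by l f => (l.length, sizeOf f, 1)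
def pvInsertGo : String → List String → PForest → PForest
  | p, rest, PForest.nil =>
      PForest.cons p
        (if rest.isEmpty then PNode.file else PNode.dir (pvInsert rest PForest.nil))
        PForest.nil
  | p, rest, PForest.cons q n f =>
      if q = p then
        if rest.isEmpty then PForest.cons q n f          -- setdefault: key present, unchanged
        else
          match n with
          | PNode.dir g => PForest.cons q (PNode.dir (pvInsert rest g)) f
          | PNode.file => PForest.cons q PNode.file f    -- Python raises here; outside Pre_
      else PForest.cons q n (pvInsertGo p rest f)
termination_by _ rest f => (rest.length + 1, sizeOf f, 0)
end

def pvBuildRoot (manifest : List (String × Int)) : PForest :=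
  (pvSortedKeys manifest).foldl (fun acc k => pvInsert (pvParts k) acc) PForest.nil

-- A's recursive render helper; `last` = idx == len(items)-1, i.e. the tail is empty.
def renderRec : PForest → String → List String
  | PForest.nil, _ => []
  | PForest.cons name n rest, pre =>
    let last : Bool := match rest with | PForest.nil => true | _ => false
    let line := pre ++ (if last then "└── " else "├── ") ++ name
    let childLines :=
      match n with
      | PNode.file => []
      | PNode.dir g => renderRec g (pre ++ (if last then "    " else "│   "))
    line :: (childLines ++ renderRec rest pre)

def format_file_tree (manifest : List (String × Int)) : String :=
  PySem.Str.join "\n" (renderRec (pvBuildRoot manifest) "")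

-- ===== PORT B =====

-- names = first-occurrence distinct heads of the path lists (B's first for-loop)
def bHeads (paths : List (List String)) : List String :=
  paths.foldl (fun ns ps =>
    match ps with
    | [] => ns
    | h :: _ => if h ∈ ns then ns else ns ++ [h]) []

-- tails = [ps[1:] for ps in paths if len(ps) > 1 and ps[0] == name]
def bTails (paths : List (List String)) (name : String) : List (List String) :=
  (paths.filter (fun ps => decide (1 < ps.length) && (ps.head? == some name))).map (List.drop 1)

-- the `while names:` loop, parameterized by the renderer used for child groups
def bLoop (walk : List (List String) → String → List String) :
    List (List String) → List String → String → List String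
  | _, [], _ => []
  | paths, name :: names, pre =>
    let cn := if names.isEmpty then ("└── ", "    ") else ("├── ", "│   ")
    let tails := bTails paths name
    (pre ++ cn.1 ++ name) ::
      ((if tails.isEmpty then [] else walk tails (pre ++ cn.2)) ++ bLoop walk paths names pre)

-- B's walk; the fuel argument only makes the recursion total (the top call
-- passes more fuel than the deepest path, so it is never exhausted).
def bWalk : Nat → List (List String) → String → List String
  | 0 => fun _ _ => []
  | fuel+1 => fun paths pre => bLoop (bWalk fuel) paths (bHeads paths) pre

def format_file_tree_alt (manifest : List (String × Int)) : String :=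
  let keys := PySem.List.sorted (((PySem.Dict.keys (PySem.Dict.ofList manifest)).filter
      (fun k => PySem.List.pyGet? ((PySem.Str.split? k "/").getD []) (-1) ≠ some ".DS_Store"))) (fun x => x) false
  let paths := keys.map (fun k => ((PySem.Str.split? k "/").getD []).filter (fun p => p ≠ ""))
  PySem.Str.join "\n" (bWalk ((paths.map List.length).sum + 1) paths "")

-- ===== PRECONDITION & SPEC =====
def pvKept (manifest : List (String × Int)) : List String :=
  (PySem.Dict.keys (PySem.Dict.ofList manifest)).filter pvKeep

-- Pre_ excludes the manifests where one kept key's nonempty slash-part list is a proper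
-- prefix of another kept key's: depending on sort order A raises AttributeError there
-- (a file node reused as a directory); where A happens to return, B returns the same
-- tree, so the exclusion is only over these collision manifests.
def Pre_format_file_tree (manifest : List (String × Int)) : Prop :=
  ∀ p ∈ pvKept manifest, ∀ q ∈ pvKept manifest,
    ¬(pvParts p ≠ [] ∧ pvParts p <+: pvParts q ∧ pvParts p ≠ pvParts q)
instance (manifest : List (String × Int)) : Decidable (Pre_format_file_tree manifest) := by
  unfold Pre_format_file_tree; infer_instance

def pvWitness_format_file_tree : (List (String × Int)) :=
  [("agents/hello.py", 1), ("LICENSE", 2), ("agents/.DS_Store", 0)]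

def Spec_format_file_tree (manifest : List (String × Int)) (out : String) : Prop := out = format_file_tree_alt manifest
instance (manifest : List (String × Int)) (out : String) : Decidable (Spec_format_file_tree manifest out) := by unfold Spec_format_file_tree; infer_instance

-- ===== CLAIM (what is proved, stated in full; the proofs are below) =====
def Claim_equal_format_file_tree : Prop := ∀ (manifest : List (String × Int)), Dom_format_file_tree manifest → Pre_format_file_tree manifest → Spec_format_file_tree manifest (format_file_tree manifest)

-- ===== LEMMAS AND PROOFS =====

-- build the forest from a list of part lists (A's outer loop, after mapping parts)
def buildF (L : List (List String)) : PForest :=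
  L.foldl (fun f ps => pvInsert ps f) PForest.nil

-- no nonempty list in L is a proper prefix of another
def NP (L : List (List String)) : Prop :=
  ∀ p ∈ L, ∀ q ∈ L, ¬(p ≠ [] ∧ p <+: q ∧ p ≠ q)

-- the forest A builds, described per name list: file iff the name has no tails
def specOf (paths : List (List String)) : List String → PForest
  | [] => PForest.nil
  | n :: ns =>
    PForest.cons n
      (if (bTails paths n).isEmpty then PNode.file else PNode.dir (buildF (bTails paths n)))
      (specOf paths ns)

theorem bTails_mem {paths : List (List String)} {n : String} {t : List String}
    (h : t ∈ bTails paths n) : (n :: t) ∈ paths := by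
  unfold bTails at h
  obtain ⟨ps, hps, ht⟩ := List.mem_map.1 h
  obtain ⟨hmem, hcond⟩ := List.mem_filter.1 hps
  cases ps with
  | nil => simp at hcond
  | cons a l =>
    simp at hcond ht
    rwa [ht, hcond.2] at hmem

theorem NP_bTails {paths : List (List String)} {n : String} (h : NP paths) :
    NP (bTails paths n) := by
  intro p hp q hq ⟨hne, hpre, hneq⟩
  exact h _ (bTails_mem hp) _ (bTails_mem hq)
    ⟨List.cons_ne_nil _ _, List.cons_prefix_cons.2 ⟨rfl, hpre⟩, by simp [hneq]⟩

theorem bHeads_witness {paths : List (List String)} {n : String} (h : n ∈ bHeads paths) :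
    ∃ ps ∈ paths, ps.head? = some n := by
  suffices haux : ∀ (L : List (List String)) (acc : List String) (m : String),
      m ∈ L.foldl (fun ns ps => match ps with
        | [] => ns
        | h :: _ => if h ∈ ns then ns else ns ++ [h]) acc →
      m ∈ acc ∨ ∃ ps ∈ L, ps.head? = some m by
    rcases haux paths [] n h with h' | h'
    · simp at h'
    · exact h'
  intro L
  induction L with
  | nil => intro acc m hm; exact Or.inl hm
  | cons ps L ih =>
    intro acc m hm
    simp only [List.foldl_cons] at hm
    cases ps with
    | nil =>
      rcases ih _ _ hm with h' | ⟨ps', h1, h2⟩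
      · exact Or.inl h'
      · exact Or.inr ⟨ps', List.mem_cons_of_mem _ h1, h2⟩
    | cons a l =>
      rcases ih _ _ hm with h' | ⟨ps', h1, h2⟩
      · by_cases ha : a ∈ acc
        · simp [ha] at h'; exact Or.inl h'
        · simp [ha, List.mem_append] at h'
          rcases h' with h' | h'
          · exact Or.inl h'
          · exact Or.inr ⟨a :: l, List.mem_cons_self, by simp [h']⟩
      · exact Or.inr ⟨ps', List.mem_cons_of_mem _ h1, h2⟩

theorem bHeads_nodup (paths : List (List String)) : (bHeads paths).Nodup := by
  suffices haux : ∀ (L : List (List String)) (acc : List String), acc.Nodup →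
      (L.foldl (fun ns ps => match ps with
        | [] => ns
        | h :: _ => if h ∈ ns then ns else ns ++ [h]) acc).Nodup from
    haux paths [] List.nodup_nil
  intro L
  induction L with
  | nil => intro acc h; exact h
  | cons ps L ih =>
    intro acc h
    simp only [List.foldl_cons]
    cases ps with
    | nil => exact ih _ h
    | cons a l =>
      by_cases ha : a ∈ acc
      · simpa [ha] using ih _ h
      · refine ih _ ?_
        simp [ha]
        exact List.Nodup.append h (List.nodup_singleton a) (by simpa using ha)

theorem bHeads_mono {paths : List (List String)} {acc : List String} {n : String}
    (h : n ∈ acc) : n ∈ paths.foldl (fun ns ps => match ps with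
        | [] => ns
        | h :: _ => if h ∈ ns then ns else ns ++ [h]) acc := by
  induction paths generalizing acc with
  | nil => exact h
  | cons ps L ih =>
    simp only [List.foldl_cons]
    cases ps with
    | nil => exact ih h
    | cons a l =>
      by_cases ha : a ∈ acc
      · simpa [ha] using ih h
      · simp only [ha, if_false]
        exact ih (List.mem_append_left _ h)

theorem bHeads_complete {paths : List (List String)} {h : String} {t : List String}
    (hm : (h :: t) ∈ paths) : h ∈ bHeads paths := by
  suffices haux : ∀ (L : List (List String)) (acc : List String),
      (h :: t) ∈ L → h ∈ L.foldl (fun ns ps => match ps with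
        | [] => ns
        | h :: _ => if h ∈ ns then ns else ns ++ [h]) acc from haux paths [] hm
  intro L
  induction L with
  | nil => intro acc hmem; simp at hmem
  | cons ps L ih =>
    intro acc hmem
    simp only [List.foldl_cons]
    rcases List.mem_cons.1 hmem with heq | hmem'
    · subst heq
      by_cases ha : h ∈ acc
      · simp only [ha, if_true]
        exact bHeads_mono ha
      · simp only [ha, if_false]
        exact bHeads_mono (List.mem_append_right _ (List.mem_singleton.2 rfl))
    · cases ps <;> exact ih _ hmem'

theorem bTails_empty_of_not_head {paths : List (List String)} {n : String}
    (h : n ∉ bHeads paths) : bTails paths n = [] := by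
  by_contra hne
  obtain ⟨t, ht⟩ := List.exists_mem_of_ne_nil _ hne
  exact h (bHeads_complete (bTails_mem ht))

theorem singleton_mem_of_empty_tails {paths : List (List String)} {n : String}
    (hh : n ∈ bHeads paths) (ht : bTails paths n = []) : [n] ∈ paths := by
  obtain ⟨ps, hps, hhd⟩ := bHeads_witness hh
  cases ps with
  | nil => simp at hhd
  | cons a l =>
    have han : a = n := by simpa using hhd
    subst han
    cases l with
    | nil => exact hps
    | cons b m =>
      exfalso
      have : (b :: m) ∈ bTails paths a := by
        unfold bTails
        refine List.mem_map.2 ⟨a :: b :: m, List.mem_filter.2 ⟨hps, by simp⟩, by simp⟩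
      rw [ht] at this
      simp at this

theorem bHeads_append (L : List (List String)) (ps : List String) :
    bHeads (L ++ [ps]) = (match ps with
      | [] => bHeads L
      | h :: _ => if h ∈ bHeads L then bHeads L else bHeads L ++ [h]) := by
  unfold bHeads
  rw [List.foldl_append]
  rfl

theorem bTails_append (L : List (List String)) (ps : List String) (n : String) :
    bTails (L ++ [ps]) n =
      bTails L n ++ (if (decide (1 < ps.length) && (ps.head? == some n)) then [ps.drop 1] else []) := by
  unfold bTails
  rw [List.filter_append, List.map_append]
  by_cases h : (decide (1 < ps.length) && (ps.head? == some n)) = true <;> simp [h]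

theorem specOf_congr {L L' : List (List String)} {ns : List String}
    (h : ∀ n ∈ ns, bTails L' n = bTails L n) : specOf L' ns = specOf L ns := by
  induction ns with
  | nil => rfl
  | cons n ns ih =>
    unfold specOf
    rw [h n List.mem_cons_self, ih (fun m hm => h m (List.mem_cons_of_mem _ hm))]

theorem buildF_append (L : List (List String)) (ps : List String) :
    buildF (L ++ [ps]) = pvInsert ps (buildF L) := by
  unfold buildF
  rw [List.foldl_append]
  rfl

-- inserting a path whose head is already a rendered name updates that entry in place
theorem ins_found (L : List (List String)) (n : String) (tl : List String)
    (hgood : tl ≠ [] → bTails L n ≠ []) :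
    ∀ ns : List String, ns.Nodup → n ∈ ns →
      pvInsertGo n tl (specOf L ns) = specOf (L ++ [n :: tl]) ns := by
  intro ns
  induction ns with
  | nil => intro _ hmem; simp at hmem
  | cons m ms ih =>
    intro hnd hmem
    have hnd' := hnd
    rw [List.nodup_cons] at hnd'
    by_cases hmn : m = n
    · subst hmn
      have hnotin : m ∉ ms := hnd'.1
      have hms : specOf (L ++ [m :: tl]) ms = specOf L ms := by
        apply specOf_congr
        intro k hk
        rw [bTails_append]
        have : ¬ (m = k) := fun h => hnotin (h ▸ hk)
        simp [this]
      by_cases htl : tl = []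
      · subst htl
        unfold specOf pvInsertGo
        have hbt : bTails (L ++ [[m]]) m = bTails L m := by
          rw [bTails_append]; simp
        simp [hbt, hms]
      · have hne := hgood htl
        have hbt : bTails (L ++ [m :: tl]) m = bTails L m ++ [tl] := by
          rw [bTails_append]
          simp [htl]
        unfold specOf pvInsertGo
        rw [hbt, hms]
        have hie : (bTails L m).isEmpty = false := by
          cases hbt' : bTails L m with
          | nil => exact absurd hbt' hne
          | cons _ _ => rfl
        have hie2 : (bTails L m ++ [tl]).isEmpty = false := by
          cases bTails L m <;> rfl
        have htlie : tl.isEmpty = false := by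
          cases tl with | nil => exact absurd rfl htl | cons _ _ => rfl
        rw [buildF_append]
        simp [hie, hie2, htlie]
    · have hmem' : n ∈ ms := by
        rcases List.mem_cons.1 hmem with h | h
        · exact absurd h.symm hmn
        · exact h
      have hnm : ¬ (n = m) := fun h => hmn h.symm
      have hbt : bTails (L ++ [n :: tl]) m = bTails L m := by
        rw [bTails_append]
        simp [hnm]
      unfold specOf pvInsertGo
      rw [hbt]
      simp only [hmn, if_false]
      rw [ih hnd'.2 hmem']

-- inserting a path with a fresh head appends a new entry at the end
theorem ins_fresh (L : List (List String)) (n : String) (tl : List String)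
    (htails : bTails L n = []) :
    ∀ ns : List String, n ∉ ns →
      pvInsertGo n tl (specOf L ns) = specOf (L ++ [n :: tl]) (ns ++ [n]) := by
  intro ns
  induction ns with
  | nil =>
    intro _
    have hbt : bTails (L ++ [n :: tl]) n = if tl = [] then [] else [tl] := by
      rw [bTails_append, htails]
      cases tl with
      | nil => simp
      | cons _ _ => simp
    simp only [List.nil_append]
    show pvInsertGo n tl PForest.nil = specOf (L ++ [n :: tl]) [n]
    unfold pvInsertGo specOf
    rw [hbt]
    by_cases htl : tl = []
    · subst htl
      simp [specOf]
    · have htlie : tl.isEmpty = false := by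
        cases tl with | nil => exact absurd rfl htl | cons _ _ => rfl
      simp only [htl, if_false, htlie, Bool.false_eq_true]
      have hje : ([tl] : List (List String)).isEmpty = false := rfl
      rw [hje]
      show PForest.cons n (PNode.dir (pvInsert tl PForest.nil)) PForest.nil =
        PForest.cons n (PNode.dir (buildF [tl])) (specOf (L ++ [n :: tl]) [])
      rfl
  | cons m ms ih =>
    intro hnotin
    have hmn : ¬ (m = n) := fun h => hnotin (h ▸ List.mem_cons_self)
    have hnm : ¬ (n = m) := fun h => hmn h.symm
    have hbt : bTails (L ++ [n :: tl]) m = bTails L m := by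
      rw [bTails_append]
      simp [hnm]
    simp only [List.cons_append]
    unfold specOf pvInsertGo
    rw [hbt, if_neg hmn]
    rw [ih (fun h => hnotin (List.mem_cons_of_mem _ h))]

theorem corr (L : List (List String)) (h : NP L) : buildF L = specOf L (bHeads L) := by
  induction L using List.reverseRecOn with
  | nil => rfl
  | append_singleton L ps ih =>
    have hL : NP L := fun p hp q hq => h p (List.mem_append_left _ hp) q (List.mem_append_left _ hq)
    rw [buildF_append, ih hL, bHeads_append]
    cases ps with
    | nil =>
      show pvInsert [] _ = _
      unfold pvInsert
      apply (specOf_congr ?_).symm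
      intro k _
      rw [bTails_append]
      simp
    | cons n tl =>
      unfold pvInsert
      by_cases hn : n ∈ bHeads L
      · simp only [hn, if_true]
        apply ins_found L n tl ?_ _ (bHeads_nodup L) hn
        intro htl hte
        have h1 : [n] ∈ L := singleton_mem_of_empty_tails hn hte
        exact h [n] (List.mem_append_left _ h1) (n :: tl)
          (List.mem_append_right _ (List.mem_singleton.2 rfl))
          ⟨by simp, List.cons_prefix_cons.2 ⟨rfl, List.nil_prefix⟩, by simp [htl]⟩
      · simp only [hn, if_false]
        exact ins_fresh L n tl (bTails_empty_of_not_head hn) _ hn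

theorem bHeads_nil_of_all_nil {L : List (List String)} (h : ∀ ps ∈ L, ps = []) :
    bHeads L = [] := by
  rw [List.eq_nil_iff_forall_not_mem]
  intro n hn
  obtain ⟨ps, hps, hhd⟩ := bHeads_witness hn
  rw [h ps hps] at hhd
  simp at hhd

theorem buildF_nil_of_all_nil {L : List (List String)} (h : ∀ ps ∈ L, ps = []) :
    buildF L = PForest.nil := by
  rw [corr L (fun p hp q hq hc => hc.1 (h p hp)), bHeads_nil_of_all_nil h]
  rfl

theorem main_render (fuel : Nat) : ∀ (L : List (List String)) (pre : String), NP L →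
    (∀ ps ∈ L, ps.length ≤ fuel) → bWalk (fuel + 1) L pre = renderRec (buildF L) pre := by
  induction fuel with
  | zero =>
    intro L pre _ hb
    have hall : ∀ ps ∈ L, ps = [] := fun ps hps => by
      have := hb ps hps; simpa using List.length_eq_zero_iff.1 (Nat.le_zero.1 this)
    rw [buildF_nil_of_all_nil hall]
    show bLoop (bWalk 0) L (bHeads L) pre = _
    rw [bHeads_nil_of_all_nil hall]
    rfl
  | succ fuel ih =>
    intro L pre hNP hb
    show bLoop (bWalk (fuel + 1)) L (bHeads L) pre = _
    rw [corr L hNP]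
    -- the while loop over the remaining names matches A's recursive render of the forest
    suffices hloop : ∀ (ns : List String) (pre : String),
        bLoop (bWalk (fuel + 1)) L ns pre = renderRec (specOf L ns) pre from hloop _ _
    intro ns
    induction ns with
    | nil => intro pre; rfl
    | cons n ms ihn =>
      intro pre
      have hchild : ∀ ext : String,
          bWalk (fuel + 1) (bTails L n) (pre ++ ext) =
          renderRec (buildF (bTails L n)) (pre ++ ext) := by
        intro ext
        apply ih _ _ (NP_bTails hNP)
        intro t ht
        have := hb (n :: t) (bTails_mem ht)
        simpa using this
      cases ms with
      | nil =>
        cases hbt : (bTails L n).isEmpty with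
        | true => simp [bLoop, specOf, renderRec, hbt]
        | false => simp [bLoop, specOf, renderRec, hbt, hchild "    "]
      | cons m ms' =>
        have h3 := ihn pre
        cases hbt : (bTails L n).isEmpty with
        | true =>
          simp [bLoop, specOf, renderRec, hbt] at h3 ⊢
          exact h3
        | false =>
          simp [bLoop, specOf, renderRec, hbt, hchild "│   "] at h3 ⊢
          exact h3

theorem np_paths {manifest : List (String × Int)} (h : Pre_format_file_tree manifest) :
    NP ((pvSortedKeys manifest).map pvParts) := by
  intro p hp q hq
  obtain ⟨kp, hkp, hpp⟩ := List.mem_map.1 hp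
  obtain ⟨kq, hkq, hqq⟩ := List.mem_map.1 hq
  rw [← hpp, ← hqq]
  unfold pvSortedKeys at hkp hkq
  rw [PySem.List.mem_sorted] at hkp hkq
  exact h kp hkp kq hkq

theorem len_le_sum {L : List (List String)} {ps : List String} (h : ps ∈ L) :
    ps.length ≤ (L.map List.length).sum := by
  induction L with
  | nil => simp at h
  | cons x L ih =>
    rcases List.mem_cons.1 h with rfl | h'
    · simp
    · simp only [List.map_cons, List.sum_cons]
      exact le_trans (ih h') (Nat.le_add_left _ _)

-- ===== VERDICT (by name: the statement is the Claim_ definition above) =====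
theorem format_file_tree_spec : Claim_equal_format_file_tree := by
  intro manifest _ hpre
  unfold Spec_format_file_tree format_file_tree format_file_tree_alt
  have hb : pvBuildRoot manifest = buildF ((pvSortedKeys manifest).map pvParts) := by
    unfold pvBuildRoot buildF
    rw [List.foldl_map]
  rw [hb, ← main_render _ _ _ (np_paths hpre) (fun ps hps => len_le_sum hps)]
  rfl
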